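-- pv_equiv track=rewrite | github.com/H4sh3/ML2.0 | gym-traffic/gym_traffic/envs/traffic_env.py | gen_permutation
-- ===== SOURCE A (Python) =====
-- import itertools
--
-- def gen_permutation(positions):
--     res = []
--     for i in range(len(positions)+1):
--         for x in itertools.combinations(positions,i):
--             tmp = []
--             for o in x:
--                 tmp.append(o)
--             res.append(tmp)
--     return res
-- ===== SOURCE B (Python) =====
-- def gen_permutation(positions):
--     n = len(positions)
--     idx_lists = [[i for i in range(n) if (mask >> i) & 1] for mask in range(1 << n)]
--     idx_lists = sorted(idx_lists, key=lambda l: (len(l), l))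
--     return [[positions[i] for i in l] for l in idx_lists]
-- ===== Notes on version B (the rewrite author's own statement) =====
-- stated objective: alternative
-- what changed: Replaces per-size itertools.combinations generation with a bitmask enumeration of all subsets as index lists, sorted by (size, lexicographic index order), then mapped through positions.
import Mathlib
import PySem

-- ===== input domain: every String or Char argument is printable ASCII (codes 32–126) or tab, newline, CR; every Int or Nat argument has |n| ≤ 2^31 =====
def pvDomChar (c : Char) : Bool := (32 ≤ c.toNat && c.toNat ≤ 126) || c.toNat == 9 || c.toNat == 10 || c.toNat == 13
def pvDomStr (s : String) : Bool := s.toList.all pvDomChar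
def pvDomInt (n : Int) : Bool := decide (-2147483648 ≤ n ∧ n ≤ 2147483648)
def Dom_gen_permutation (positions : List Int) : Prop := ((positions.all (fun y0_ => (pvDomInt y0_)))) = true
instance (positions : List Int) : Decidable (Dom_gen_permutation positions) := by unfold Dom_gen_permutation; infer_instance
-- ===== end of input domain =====

-- B replaces the per-size itertools.combinations generation with a bitmask enumeration of all
-- subsets as index lists sorted by (size, lexicographic index order) — an alternative algorithm,
-- not claimed faster.

-- ===== PORT A =====
-- res = []; for i in range(len(positions)+1): for x in combinations(positions, i):
--   tmp = []; for o in x: tmp.append(o); res.append(tmp)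
-- i.toNat is exact: i ranges over 0..len(positions), all nonnegative.
def gen_permutation (positions : List Int) : List (List Int) :=
  (PySem.List.pyRange 0 ((positions.length : Int) + 1)).foldl
    (fun res i =>
      (PySem.List.combinations positions i.toNat).foldl
        (fun res x => res ++ [x.foldl (fun tmp o => tmp ++ [o]) []]) res)
    []

-- ===== PORT B =====
-- (mask >> i) & 1 : floor-division by 2^i then mod 2 — exact for mask ≥ 0, i ≥ 0, the only calls here.
def pyBit (mask i : Int) : Int := PySem.Int.mod (PySem.Int.floordiv mask (2 ^ i.toNat)) 2

-- n = len(positions); idx_lists = [[i for i in range(n) if (mask >> i) & 1] for mask in range(1 << n)]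
-- idx_lists = sorted(idx_lists, key=lambda l: (len(l), l)); return [[positions[i] for i in l] for l in idx_lists]
-- 1 << n ported as 2 ^ n.toNat (exact, n ≥ 0); positions[i] is always in range, so .getD 0 never fires.
def gen_permutation_alt (positions : List Int) : List (List Int) :=
  let n : Int := (positions.length : Int)
  let idxLists := (PySem.List.pyRange 0 ((2 : Int) ^ n.toNat)).map
    (fun mask => (PySem.List.pyRange 0 n).filter (fun i => pyBit mask i == 1))
  let sortedLists := PySem.List.sorted2 idxLists (fun l => (l.length : Int)) (fun l => l)
  sortedLists.map (fun l => l.map (fun i => (PySem.List.pyGet? positions i).getD 0))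

-- ===== PRECONDITION & SPEC =====
def Spec_gen_permutation (positions : List Int) (out : List (List Int)) : Prop := out = gen_permutation_alt positions
instance (positions : List Int) (out : List (List Int)) : Decidable (Spec_gen_permutation positions out) := by unfold Spec_gen_permutation; infer_instance

-- ===== CLAIM (what is proved, stated in full; the proofs are below) =====
def Claim_equal_gen_permutation : Prop := ∀ (positions : List Int), Dom_gen_permutation positions → Spec_gen_permutation positions (gen_permutation positions)

-- ===== LEMMAS AND PROOFS =====

-- [0, 1, …, n-1] as integers
def pvIRange (n : Nat) : List Int := (List.range n).map Int.ofNat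

-- the subsets of {0,…,n-1} as increasing index lists, in binary-counter order
def pvSubLists : Nat → List (List Int)
  | 0 => [[]]
  | n+1 => pvSubLists n ++ (pvSubLists n).map (· ++ [(n : Int)])

-- the target order: grouped by size, each size block in combinations' lexicographic order
def pvT (n : Nat) : List (List Int) :=
  (List.range (n+1)).flatMap (fun k => PySem.List.combinations (pvIRange n) k)

-- the sort key (len(l), l) as a lexicographic pair
def pvKey (l : List Int) : Lex (Int × List Int) := toLex ((l.length : Int), l)

lemma pvOfNat (k : Nat) : Int.ofNat k = (k : Int) := rfl

lemma pvPyRange_natCast (n : Nat) : PySem.List.pyRange 0 (n : Int) = (List.range n).map Int.ofNat := by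
  simp only [PySem.List.pyRange]
  norm_num
  rcases Nat.eq_zero_or_pos n with h | h
  · subst h; norm_num
  · rw [if_pos (by exact_mod_cast h)]
    norm_num

lemma pvIRange_succ (n : Nat) : pvIRange (n+1) = pvIRange n ++ [(n : Int)] := by
  simp [pvIRange, List.range_succ]

lemma pvA_eq (positions : List Int) :
    gen_permutation positions
      = (List.range (positions.length + 1)).flatMap (fun k => PySem.List.combinations positions k) := by
  unfold gen_permutation
  have h1 : ∀ (x : List Int), x.foldl (fun tmp o => tmp ++ [o]) [] = x := fun x => by
    simpa using PySem.List.foldl_append_singleton_eq_self x []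
  have h2 : ∀ (res : List (List Int)) (i : Int),
      (PySem.List.combinations positions i.toNat).foldl
        (fun res x => res ++ [x.foldl (fun tmp o => tmp ++ [o]) []]) res
        = res ++ PySem.List.combinations positions i.toNat := by
    intro res i
    rw [PySem.List.foldl_append_singleton_eq_map
      (f := fun x : List Int => x.foldl (fun tmp o => tmp ++ [o]) [])]
    simp [h1]
  simp only [h2]
  rw [PySem.List.foldl_append_eq_flatMap]
  have h3 : ((positions.length : Int) + 1) = ((positions.length + 1 : Nat) : Int) := by push_cast; ring
  rw [h3, pvPyRange_natCast, List.flatMap_map]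
  simp

lemma pvBit_cast (m i : Nat) :
    pyBit (m : Int) (i : Int) = if m.testBit i then 1 else 0 := by
  unfold pyBit PySem.Int.mod PySem.Int.floordiv
  rw [Int.toNat_natCast]
  have hp : (0:Int) ≤ 2 ^ i := by positivity
  rw [Int.fdiv_eq_ediv, if_pos (Or.inl hp), Int.fmod_eq_emod, if_pos (Or.inl (by norm_num : (0:Int) ≤ 2))]
  have hdiv : (m : Int) / (2:Int) ^ i = ((m / 2 ^ i : Nat) : Int) := by
    push_cast
    rfl
  rw [hdiv, sub_zero]
  have hmod : ((m / 2 ^ i : Nat) : Int) % 2 = ((m / 2 ^ i % 2 : Nat) : Int) := by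
    push_cast
    rfl
  rw [hmod, Nat.testBit_eq_decide_div_mod_eq]
  have h01 : m / 2 ^ i % 2 = 0 ∨ m / 2 ^ i % 2 = 1 := by omega
  rcases h01 with h | h <;> simp [h]

-- the bitmask comprehension over Nat masks, with the binary-counter recursion
lemma pvNatMask (n : Nat) :
    (List.range (2 ^ n)).map
      (fun m => ((List.range n).filter (fun i => m.testBit i)).map Int.ofNat)
      = pvSubLists n := by
  induction n with
  | zero => simp [pvSubLists]
  | succ n ih =>
    have hr : List.range (2 ^ (n+1)) = List.range (2 ^ n) ++ (List.range (2 ^ n)).map (fun x => 2 ^ n + x) := by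
      rw [pow_succ, mul_two, List.range_add]
    rw [hr, List.map_append, List.map_map]
    have hfirst : (List.range (2 ^ n)).map
        (fun m => ((List.range (n+1)).filter (fun i => m.testBit i)).map Int.ofNat)
        = pvSubLists n := by
      rw [← ih]
      apply List.map_congr_left
      intro m hm
      rw [List.mem_range] at hm
      rw [List.range_succ, List.filter_append]
      have : (List.filter (fun i => m.testBit i) [n]) = [] := by
        simp [List.filter, Nat.testBit_lt_two_pow hm]
      rw [this, List.append_nil]
    have hsecond : (List.range (2 ^ n)).map
        ((fun m => ((List.range (n+1)).filter (fun i => m.testBit i)).map Int.ofNat) ∘ (fun x => 2 ^ n + x))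
        = (pvSubLists n).map (· ++ [(n : Int)]) := by
      rw [← ih, List.map_map]
      apply List.map_congr_left
      intro m hm
      rw [List.mem_range] at hm
      simp only [Function.comp]
      rw [List.range_succ, List.filter_append]
      have h1 : List.filter (fun i => (2 ^ n + m).testBit i) [n] = [n] := by
        simp [List.filter, Nat.testBit_two_pow_add_eq, Nat.testBit_lt_two_pow hm]
      have h2 : List.filter (fun i => (2 ^ n + m).testBit i) (List.range n)
          = List.filter (fun i => m.testBit i) (List.range n) := by
        apply List.filter_congr
        intro i hi
        rw [List.mem_range] at hi
        rw [Nat.testBit_two_pow_add_gt hi]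
      rw [h1, h2, List.map_append]
      rfl
    rw [hfirst, hsecond]
    rfl

lemma pvMask_eq (n : Nat) :
    (PySem.List.pyRange 0 ((2 : Int) ^ n)).map
      (fun mask => (PySem.List.pyRange 0 (n : Int)).filter (fun i => pyBit mask i == 1))
      = pvSubLists n := by
  have h2 : ((2 : Int) ^ n) = ((2 ^ n : Nat) : Int) := by push_cast; ring
  rw [h2, pvPyRange_natCast, pvPyRange_natCast, List.map_map]
  rw [← pvNatMask n]
  apply List.map_congr_left
  intro m _
  simp only [Function.comp]
  rw [List.filter_map]
  congr 1
  apply List.filter_congr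
  intro i _
  simp only [Function.comp, pvOfNat]
  rw [pvBit_cast]
  cases m.testBit i <;> simp

lemma pvMem_subLists (n : Nat) (c : List Int) : c ∈ pvSubLists n ↔ c.Sublist (pvIRange n) := by
  induction n generalizing c with
  | zero => simp [pvSubLists, pvIRange]
  | succ n ih =>
    rw [pvIRange_succ]
    constructor
    · intro hc
      rcases List.mem_append.mp hc with h | h
      · exact ((ih c).mp h).trans (List.sublist_append_left _ _)
      · rcases List.mem_map.mp h with ⟨t, ht, rfl⟩
        exact List.Sublist.append ((ih t).mp ht) (List.Sublist.refl _)
    · intro hc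
      rcases List.sublist_append_iff.mp hc with ⟨l₁, l₂, rfl, hl₁, hl₂⟩
      rcases List.sublist_singleton.mp hl₂ with rfl | rfl
      · exact List.mem_append.mpr (Or.inl ((ih _).mpr (by simpa using hl₁)))
      · exact List.mem_append.mpr (Or.inr (List.mem_map.mpr ⟨l₁, (ih _).mpr hl₁, rfl⟩))

lemma pvSubLists_lt (n : Nat) (c : List Int) (hc : c ∈ pvSubLists n) : ∀ a ∈ c, a < (n : Int) := by
  intro a ha
  have hs := (pvMem_subLists n c).mp hc
  have : a ∈ pvIRange n := hs.subset ha
  rcases List.mem_map.mp this with ⟨k, hk, rfl⟩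
  rw [List.mem_range] at hk
  simp only [pvOfNat]
  exact_mod_cast hk

lemma pvNodup_subLists (n : Nat) : (pvSubLists n).Nodup := by
  induction n with
  | zero => simp [pvSubLists]
  | succ n ih =>
    refine List.Nodup.append ih (ih.map (fun a b h => by simpa using (List.append_left_inj [(n:Int)]).mp h)) ?_
    intro c hc hc'
    rcases List.mem_map.mp hc' with ⟨t, _, rfl⟩
    have hn : (n : Int) ∈ t ++ [(n : Int)] := by simp
    exact absurd (pvSubLists_lt n _ hc _ hn) (lt_irrefl _)

lemma pvMem_T (n : Nat) (c : List Int) : c ∈ pvT n ↔ c.Sublist (pvIRange n) := by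
  unfold pvT
  constructor
  · intro hc
    rcases List.mem_flatMap.mp hc with ⟨k, _, hk⟩
    exact PySem.List.sublist_of_mem_combinations hk
  · intro hc
    refine List.mem_flatMap.mpr ⟨c.length, ?_, ?_⟩
    · rw [List.mem_range]
      have := hc.length_le
      simp only [pvIRange, List.length_map, List.length_range] at this
      omega
    · exact (PySem.List.mem_combinations_iff _ _ _).mpr ⟨hc, rfl⟩

lemma pvCombos_pairwise_lex (xs : List Int) (h : xs.Pairwise (· < ·)) (k : Nat) :
    (PySem.List.combinations xs k).Pairwise (· < ·) := by
  induction xs generalizing k with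
  | nil =>
    cases k with
    | zero => simp [PySem.List.combinations_zero]
    | succ k => simp [PySem.List.combinations_nil_succ]
  | cons x xs ih =>
    cases k with
    | zero => simp [PySem.List.combinations_zero]
    | succ k =>
      rw [PySem.List.combinations_cons_succ, List.pairwise_append]
      refine ⟨?_, ih h.of_cons (k+1), ?_⟩
      · rw [List.pairwise_map]
        exact (ih h.of_cons k).imp (fun {a b} hab => by
          rw [List.cons_lt_cons_iff]; exact Or.inr ⟨rfl, hab⟩)
      · intro a ha b hb
        rcases List.mem_map.mp ha with ⟨c, _, rfl⟩
        have hlen : b.length = k + 1 := PySem.List.length_of_mem_combinations hb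
        rcases b with _ | ⟨y, t⟩
        · simp at hlen
        · have hy : y ∈ xs := (PySem.List.sublist_of_mem_combinations hb).subset (by simp)
          rw [List.cons_lt_cons_iff]
          exact Or.inl (List.rel_of_pairwise_cons h hy)

lemma pvIRange_pairwise (n : Nat) : (pvIRange n).Pairwise (· < ·) := by
  unfold pvIRange
  rw [List.pairwise_map]
  exact List.pairwise_lt_range.imp (fun {a b} hab => by
    simp only [pvOfNat]; exact_mod_cast hab)

lemma pvT_pairwise (n : Nat) : (pvT n).Pairwise (fun a b => pvKey a < pvKey b) := by
  unfold pvT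
  rw [List.pairwise_flatMap]
  constructor
  · intro k _
    refine List.Pairwise.imp_of_mem ?_ (pvCombos_pairwise_lex (pvIRange n) (pvIRange_pairwise n) k)
    intro a b ha hb hab
    have ha' := PySem.List.length_of_mem_combinations ha
    have hb' := PySem.List.length_of_mem_combinations hb
    rw [pvKey, pvKey, Prod.Lex.lt_iff]
    exact Or.inr ⟨by simp [ha', hb'], by simpa using hab⟩
  · refine List.pairwise_lt_range.imp ?_
    intro k₁ k₂ hk x hx y hy
    have hx' := PySem.List.length_of_mem_combinations hx
    have hy' := PySem.List.length_of_mem_combinations hy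
    rw [pvKey, pvKey, Prod.Lex.lt_iff]
    left
    simp [hx', hy']
    exact_mod_cast hk

lemma pvNodup_T (n : Nat) : (pvT n).Nodup := by
  have := pvT_pairwise n
  exact this.imp (fun {a b} hab => by
    intro h; subst h; exact absurd hab (lt_irrefl _))

lemma pvSubLists_perm (n : Nat) : (pvSubLists n).Perm (pvT n) := by
  rw [List.perm_ext_iff_of_nodup (pvNodup_subLists n) (pvNodup_T n)]
  intro c
  rw [pvMem_subLists, pvMem_T]

lemma pvSorted2_eq_sorted (xs : List (List Int)) :
    PySem.List.sorted2 xs (fun l => (l.length : Int)) (fun l => l)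
      = PySem.List.sorted xs pvKey := by
  rw [PySem.List.sorted_eq_foldl_insertBy]
  unfold PySem.List.sorted2
  simp only [if_neg (by simp : ¬ (false = true))]
  have hfun : (fun (a b : List Int) =>
        decide ((a.length : Int) < (b.length : Int)) ||
          (!decide ((b.length : Int) < (a.length : Int)) && decide (a < b)))
      = fun a b => decide (pvKey a < pvKey b) := by
    funext a b
    rcases Nat.lt_trichotomy a.length b.length with h | h | h
    · simp [pvKey, Prod.Lex.lt_iff, h, Nat.lt_asymm h]
    · simp [pvKey, Prod.Lex.lt_iff, h]
    · simp [pvKey, Prod.Lex.lt_iff, h, Nat.lt_asymm h]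
      intro he
      exact absurd he (by omega)
  rw [hfun]

lemma pvPositions_eq (positions : List Int) :
    positions = (pvIRange positions.length).map (fun i => (PySem.List.pyGet? positions i).getD 0) := by
  apply List.ext_getElem
  · simp [pvIRange]
  · intro i h1 h2
    simp only [pvIRange, List.map_map, List.getElem_map, List.getElem_range]
    simp only [Function.comp, pvOfNat]
    rw [PySem.List.pyGet?_natCast]
    simp [List.getElem?_eq_getElem h1]

-- ===== VERDICT (by name: the statement is the Claim_ definition above) =====
theorem gen_permutation_spec : Claim_equal_gen_permutation := by
  intro positions _
  show gen_permutation positions = gen_permutation_alt positions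
  unfold gen_permutation_alt
  simp only [Int.toNat_natCast]
  rw [pvMask_eq, pvSorted2_eq_sorted,
    PySem.List.sorted_eq_of_perm_of_pairwise_lt _ (pvT positions.length) pvKey
      (pvSubLists_perm positions.length).symm (pvT_pairwise positions.length)]
  rw [pvA_eq]
  unfold pvT
  rw [List.map_flatMap]
  apply List.flatMap_congr
  intro k _
  rw [← PySem.List.combinations_map, ← pvPositions_eq]
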